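-- pv_equiv track=rewrite | github.com/shutpa01/cryptic_solver_v2 | signature_solver/api_solver.py | _try_reversal_combos
-- ===== SOURCE A (Python) =====
-- def _try_reversal_combos(contribs, answer):
--     """Try reversing one or more pieces and concatenating."""
--     letters_list = [c[0] for c in contribs]
--     n = len(letters_list)
--
--     # Try reversing each single piece
--     for i in range(n):
--         parts = list(letters_list)
--         parts[i] = parts[i][::-1]
--         if "".join(parts) == answer:
--             return True
--
--     # Try reversing all pieces
--     parts = [l[::-1] for l in letters_list]
--     if "".join(parts) == answer:
--         return True
--
--     # Try reversing concatenation of all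
--     if "".join(letters_list)[::-1] == answer:
--         return True
--
--     # Try reversed order of pieces (each piece intact)
--     if "".join(reversed(letters_list)) == answer:
--         return True
--
--     # Try reversed order with each piece also reversed
--     if "".join(l[::-1] for l in reversed(letters_list)) == answer:
--         return True
--
--     return False
-- ===== SOURCE B (Python) =====
-- def _lcp(a, b):
--     """Length of the longest common prefix of a and b."""
--     i = 0
--     m = min(len(a), len(b))
--     while i < m and a[i] == b[i]:
--         i += 1
--     return i
--
--
-- def _segmented(answer, segs):
--     """Does answer consist exactly of the given segments in order?
--     (Incremental matching with early exit; no candidate string is built.)"""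
--     pos = 0
--     for s in segs:
--         e = pos + len(s)
--         if answer[pos:e] != s:
--             return False
--         pos = e
--     return True
--
--
-- def _try_reversal_combos(contribs, answer):
--     """Try reversing one or more pieces and concatenating.
--
--     Different strategy: gate on total length; match the fixed patterns
--     segment by segment with early exit; for the single-piece reversals,
--     precompute the longest common prefix/suffix of answer with the full
--     concatenation and verify only the reversed region per piece."""
--     pieces = [c[0] for c in contribs]
--     full = "".join(pieces)
--     L = len(full)
--     if len(answer) != L:
--         return False
--     # reversed concatenation of all (== reversed order with each piece reversed)
--     if answer == full[::-1]:
--         return True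
--     # each piece reversed in place
--     if _segmented(answer, [p[::-1] for p in pieces]):
--         return True
--     # reversed order of pieces (each piece intact)
--     if _segmented(answer, pieces[::-1]):
--         return True
--     # exactly one piece reversed: answer must agree with full outside the
--     # piece's region, which the common prefix/suffix lengths certify
--     pre = _lcp(answer, full)
--     suf = _lcp(answer[::-1], full[::-1])
--     pos = 0
--     for p in pieces:
--         e = pos + len(p)
--         if pos <= pre and L - e <= suf and answer[pos:e] == p[::-1]:
--             return True
--         pos = e
--     return False
-- ===== Notes on version B (the rewrite author's own statement) =====
-- stated objective: alternative
-- what changed: B gates on total length, matches the fixed patterns segment-by-segment with early exit instead of building candidate strings, and replaces A's per-index copy-and-join loop by a longest-common-prefix/suffix precomputation with answer so each single-piece reversal is verified only on its own region.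
import Mathlib
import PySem

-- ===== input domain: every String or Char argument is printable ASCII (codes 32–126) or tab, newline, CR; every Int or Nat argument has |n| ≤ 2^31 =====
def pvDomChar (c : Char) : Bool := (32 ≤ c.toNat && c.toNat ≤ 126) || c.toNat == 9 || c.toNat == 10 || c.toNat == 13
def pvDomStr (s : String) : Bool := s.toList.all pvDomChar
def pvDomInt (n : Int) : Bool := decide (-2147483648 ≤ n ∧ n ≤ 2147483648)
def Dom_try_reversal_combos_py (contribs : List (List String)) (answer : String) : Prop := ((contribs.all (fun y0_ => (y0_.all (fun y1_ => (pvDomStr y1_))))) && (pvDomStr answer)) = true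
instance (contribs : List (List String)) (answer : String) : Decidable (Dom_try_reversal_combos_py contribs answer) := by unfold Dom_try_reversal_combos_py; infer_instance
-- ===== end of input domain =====

-- B replaces A's per-index copy-and-join loop by a length gate, segment-by-segment matching
-- of the fixed patterns, and a common-prefix/suffix precomputation so each single-piece
-- reversal is verified only on its own region; equivalence is proved on Pre_.


-- ===== PORT A =====
-- "".join of Python strings is ported as List.flatten on character lists;
-- l[::-1] is List.reverse; c[0] is pyGetD (Pre_ keeps it in range).
def try_reversal_combos_py (contribs : List (List String)) (answer : String) : Bool :=
  let letters : List (List Char) := contribs.map (fun c => (PySem.List.pyGetD c 0 "").toList)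
  let n := letters.length
  let ans := answer.toList
  if (List.range n).any (fun i => (letters.set i (letters[i]!.reverse)).flatten == ans) then true
  else if (letters.map List.reverse).flatten == ans then true
  else if letters.flatten.reverse == ans then true
  else if letters.reverse.flatten == ans then true
  else if (letters.reverse.map List.reverse).flatten == ans then true
  else false

-- ===== PORT B =====
-- the while-loop of Source B's _lcp: longest common prefix length
def lcpLen : List Char → List Char → Nat
  | a :: as, b :: bs => if a = b then lcpLen as bs + 1 else 0
  | _, _ => 0

-- Source B's _segmented: match the answer segment by segment with a running offset, early exit
def segmented (ans : List Char) : Nat → List (List Char) → Bool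
  | _, [] => true
  | pos, s :: rest => ((ans.drop pos).take s.length == s) && segmented ans (pos + s.length) rest

-- Source B's final loop: per piece, the prefix/suffix window test plus the local region compare
def singleWin (ans : List Char) (L pre suf : Nat) : Nat → List (List Char) → Bool
  | _, [] => false
  | pos, p :: rest =>
    (decide (pos ≤ pre) && decide (L - (pos + p.length) ≤ suf)
      && ((ans.drop pos).take p.length == p.reverse))
    || singleWin ans L pre suf (pos + p.length) rest

def try_reversal_combos_py_alt (contribs : List (List String)) (answer : String) : Bool :=
  let pieces : List (List Char) := contribs.map (fun c => (PySem.List.pyGetD c 0 "").toList)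
  let full := pieces.flatten
  let L := full.length
  let ans := answer.toList
  if ans.length ≠ L then false
  else if ans == full.reverse then true
  else if segmented ans 0 (pieces.map List.reverse) then true
  else if segmented ans 0 pieces.reverse then true
  else
    singleWin ans L (lcpLen ans full) (lcpLen ans.reverse full.reverse) 0 pieces

-- ===== PRECONDITION & SPEC =====
-- Pre_ excludes contribs containing an empty inner list: there Python's c[0] raises IndexError.
def Pre_try_reversal_combos_py (contribs : List (List String)) (answer : String) : Prop :=
  ∀ c ∈ contribs, c ≠ []
instance (contribs : List (List String)) (answer : String) : Decidable (Pre_try_reversal_combos_py contribs answer) := by unfold Pre_try_reversal_combos_py; infer_instance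

def pvWitness_try_reversal_combos_py : List (List String) × String := ([["ab"], ["cd"]], "bacd")

def Spec_try_reversal_combos_py (contribs : List (List String)) (answer : String) (out : Bool) : Prop := out = try_reversal_combos_py_alt contribs answer
instance (contribs : List (List String)) (answer : String) (out : Bool) : Decidable (Spec_try_reversal_combos_py contribs answer out) := by unfold Spec_try_reversal_combos_py; infer_instance

-- ===== CLAIM (what is proved, stated in full; the proofs are below) =====
def Claim_equal_try_reversal_combos_py : Prop := ∀ (contribs : List (List String)) (answer : String), Dom_try_reversal_combos_py contribs answer → Pre_try_reversal_combos_py contribs answer → Spec_try_reversal_combos_py contribs answer (try_reversal_combos_py contribs answer)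

-- ===== LEMMAS AND PROOFS =====

-- proof-side helper: A's single-reversal loop rewritten as a running-offset scan
def singleScan (full ans : List Char) : Nat → List (List Char) → Bool
  | _, [] => false
  | pos, l :: rest =>
    (full.take pos ++ l.reverse ++ full.drop (pos + l.length) == ans)
    || singleScan full ans (pos + l.length) rest

-- A's any-over-indices single-reversal test equals the running-offset scan
lemma singleScan_eq_any (rest : List (List Char)) (pre ans : List Char) :
    singleScan (pre ++ rest.flatten) ans pre.length rest
      = (List.range rest.length).any
          (fun i => (pre ++ (rest.set i (rest[i]!.reverse)).flatten) == ans) := by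
  induction rest generalizing pre with
  | nil => simp [singleScan]
  | cons l rest ih =>
    have h1 : (pre ++ (l :: rest).flatten).take pre.length = pre := by simp
    have h2 : (pre ++ (l :: rest).flatten).drop (pre.length + l.length) = rest.flatten := by
      rw [List.flatten_cons, ← List.append_assoc]
      have : pre.length + l.length = (pre ++ l).length := by simp
      rw [this, List.drop_left]
    have h3 : singleScan (pre ++ (l :: rest).flatten) ans (pre.length + l.length) rest
        = (List.range rest.length).any
            (fun i => ((pre ++ l) ++ (rest.set i (rest[i]!.reverse)).flatten) == ans) := by
      have e1 : pre ++ (l :: rest).flatten = (pre ++ l) ++ rest.flatten := by simp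
      have e2 : pre.length + l.length = (pre ++ l).length := by simp
      rw [e1, e2, ih (pre ++ l)]
    rw [singleScan, h1, h2, h3]
    simp only [List.length_cons, List.range_succ_eq_map, List.any_cons, List.any_map,
      Function.comp_def]
    simp [List.append_assoc]

-- lcpLen certifies prefix agreement up to k
lemma lcp_ge_iff : ∀ (a b : List Char) (k : Nat), k ≤ a.length → k ≤ b.length →
    (k ≤ lcpLen a b ↔ a.take k = b.take k) := by
  intro a
  induction a with
  | nil =>
    intro b k hk _
    have : k = 0 := Nat.le_zero.mp hk
    subst this; simp
  | cons x as ih =>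
    intro b k hka hkb
    cases b with
    | nil =>
      have : k = 0 := Nat.le_zero.mp hkb
      subst this; simp
    | cons y bs =>
      cases k with
      | zero => simp
      | succ k =>
        show k + 1 ≤ lcpLen (x :: as) (y :: bs) ↔ _
        rw [lcpLen]
        by_cases hxy : x = y
        · subst hxy
          rw [if_pos rfl]
          simp only [List.take_succ_cons, List.cons.injEq, true_and]
          rw [Nat.add_le_add_iff_right]
          exact ih bs k (Nat.le_of_succ_le_succ hka) (Nat.le_of_succ_le_succ hkb)
        · rw [if_neg hxy]
          simp only [List.take_succ_cons, List.cons.injEq]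
          constructor
          · intro h; omega
          · intro h; exact absurd h.1 hxy

-- segmented matching equals equality with the flattened segments (when lengths add up)
lemma segmented_eq_flatten : ∀ (segs : List (List Char)) (ans : List Char) (pos : Nat),
    pos + segs.flatten.length = ans.length →
    segmented ans pos segs = (segs.flatten == ans.drop pos) := by
  intro segs
  induction segs with
  | nil =>
    intro ans pos h
    simp only [List.flatten_nil, List.length_nil, Nat.add_zero] at h
    have hd : ans.drop pos = [] := List.drop_eq_nil_of_le (Nat.le_of_eq h.symm)
    simp [segmented, hd]
  | cons s rest ih =>
    intro ans pos h
    simp only [List.flatten_cons, List.length_append] at h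
    have hrec := ih ans (pos + s.length) (by omega)
    rw [segmented, hrec, Bool.eq_iff_iff]
    simp only [Bool.and_eq_true, beq_iff_eq, List.flatten_cons]
    have hlen : ((ans.drop pos).take s.length).length = s.length := by
      simp; omega
    have hdd : (ans.drop pos).drop s.length = ans.drop (pos + s.length) := by
      rw [List.drop_drop]
    constructor
    · rintro ⟨h1, h2⟩
      calc s ++ rest.flatten
          = (ans.drop pos).take s.length ++ (ans.drop pos).drop s.length := by
            rw [h1, hdd, ← h2]
        _ = ans.drop pos := List.take_append_drop _ _
    · intro he
      have hd : (ans.drop pos).take s.length ++ (ans.drop pos).drop s.length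
          = s ++ rest.flatten := by rw [List.take_append_drop]; exact he.symm
      have hsplit := List.append_inj hd hlen
      refine ⟨hsplit.1, ?_⟩
      rw [← hdd]; exact hsplit.2.symm

-- the crux: the window test certifies exactly A's single-piece candidate equality
lemma window_eq (preL p post ans : List Char)
    (hlen : ans.length = (preL ++ p ++ post).length) :
    ((preL ++ p ++ post).take preL.length ++ p.reverse
        ++ (preL ++ p ++ post).drop (preL.length + p.length) == ans)
      = (decide (preL.length ≤ lcpLen ans (preL ++ p ++ post))
          && decide ((preL ++ p ++ post).length - (preL.length + p.length)
              ≤ lcpLen ans.reverse (preL ++ p ++ post).reverse)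
          && ((ans.drop preL.length).take p.length == p.reverse)) := by
  have hL : (preL ++ p ++ post).length = preL.length + p.length + post.length := by
    simp [Nat.add_assoc]
  have hans : ans.length = preL.length + p.length + post.length := hlen.trans hL
  have htake : (preL ++ p ++ post).take preL.length = preL := by
    rw [List.append_assoc, List.take_left]
  have hdrop : (preL ++ p ++ post).drop (preL.length + p.length) = post := by
    have : preL.length + p.length = (preL ++ p).length := by simp
    rw [this, List.drop_left]
  have hLe : (preL ++ p ++ post).length - (preL.length + p.length) = post.length := by omega
  have hlcp := lcp_ge_iff ans (preL ++ p ++ post) preL.length (by omega) (by omega)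
  have hsuf := lcp_ge_iff ans.reverse (preL ++ p ++ post).reverse post.length
      (by simp only [List.length_reverse]; omega) (by simp only [List.length_reverse]; omega)
  have hrt1 : ans.reverse.take post.length = (ans.drop (ans.length - post.length)).reverse :=
    List.take_reverse
  have hrt2 : (preL ++ p ++ post).reverse.take post.length
      = ((preL ++ p ++ post).drop ((preL ++ p ++ post).length - post.length)).reverse :=
    List.take_reverse
  have he1 : ans.length - post.length = preL.length + p.length := by omega
  have he2 : (preL ++ p ++ post).length - post.length = preL.length + p.length := by omega
  rw [htake, Bool.eq_iff_iff]
  simp only [Bool.and_eq_true, beq_iff_eq, decide_eq_true_eq]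
  rw [hLe, hlcp, hsuf, hrt1, hrt2, he1, he2, hdrop, htake]
  constructor
  · intro he
    have h1 : ans.take preL.length = preL := by
      rw [← he, List.append_assoc, List.take_left]
    have h2 : ans.drop (preL.length + p.length) = post := by
      have hpl : preL.length + p.length = (preL ++ p.reverse).length := by simp
      rw [← he, hpl, List.drop_left]
    have h3 : (ans.drop preL.length).take p.length = p.reverse := by
      have hd : ans.drop preL.length = p.reverse ++ post := by
        rw [← he, List.append_assoc, List.drop_left]
      have hpq : p.length = p.reverse.length := by simp
      rw [hd, hpq, List.take_left]
    exact ⟨⟨h1, by rw [h2]⟩, h3⟩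
  · rintro ⟨⟨h1, h2⟩, h3⟩
    have hpost : ans.drop (preL.length + p.length) = post :=
      List.reverse_injective h2
    have hsplit : ans = ans.take preL.length ++ ((ans.drop preL.length).take p.length)
        ++ ans.drop (preL.length + p.length) := by
      conv_lhs => rw [← List.take_append_drop preL.length ans]
      rw [List.append_assoc]
      congr 1
      conv_lhs => rw [← List.take_append_drop p.length (ans.drop preL.length)]
      rw [List.drop_drop]
    conv_rhs => rw [hsplit]
    rw [h1, h3, hpost]

-- B's window scan equals the running-offset scan (whole-concatenation version)
lemma singleWin_eq_singleScan (full ans : List Char) (h : ans.length = full.length) :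
    ∀ (rest : List (List Char)) (preL : List Char), full = preL ++ rest.flatten →
    singleWin ans full.length (lcpLen ans full) (lcpLen ans.reverse full.reverse)
        preL.length rest
      = singleScan full ans preL.length rest := by
  intro rest
  induction rest with
  | nil => intro preL _; simp [singleWin, singleScan]
  | cons p rest ih =>
    intro preL hfull
    have hfull' : full = (preL ++ p) ++ rest.flatten := by
      rw [hfull]; simp [List.append_assoc]
    have hrec := ih (preL ++ p) hfull'
    simp only [List.length_append] at hrec
    rw [singleWin, singleScan, hrec]
    congr 1
    have hlen' : ans.length = (preL ++ p ++ rest.flatten).length := by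
      rw [← hfull']; exact h
    have hw := window_eq preL p rest.flatten ans hlen'
    rw [hfull]
    simp only [List.flatten_cons, ← List.append_assoc]
    exact hw.symm

-- flatten length is preserved by reversing the i-th element in place
lemma length_flatten_set : ∀ (P : List (List Char)) (i : Nat), i < P.length →
    ((P.set i (P[i]!.reverse)).flatten).length = P.flatten.length := by
  intro P
  induction P with
  | nil => intro i h; simp at h
  | cons p P ih =>
    intro i h
    cases i with
    | zero => simp
    | succ i =>
      simp only [List.length_cons, Nat.succ_lt_succ_iff] at h
      have hrec := ih i h
      simp only [List.set_cons_succ, List.flatten_cons, List.length_append]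
      have hget : (p :: P)[i + 1]! = P[i]! := by
        simp
      rw [hget, hrec]

-- A's fifth pattern is the reversed concatenation
lemma flatten_reverse_map_reverse (L : List (List Char)) :
    ((L.reverse).map List.reverse).flatten = L.flatten.reverse := by
  rw [List.map_reverse]; exact List.reverse_flatten.symm

-- boolean rearrangement of A's five tests into B's order (A's fifth = A's third)
lemma bool_rearrange (a b c d : Bool) :
    (if a then true else if b then true else if c then true
     else if d then true else if c then true else false)
      = (if c then true else if b then true else if d then true else a) := by
  cases a <;> cases b <;> cases c <;> cases d <;> rfl

-- the two bodies agree, stated over the shared piece list and answer characters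
lemma core (P : List (List Char)) (ans : List Char) :
    (if (List.range P.length).any (fun i => (P.set i (P[i]!.reverse)).flatten == ans) then true
     else if (P.map List.reverse).flatten == ans then true
     else if P.flatten.reverse == ans then true
     else if P.reverse.flatten == ans then true
     else if (P.reverse.map List.reverse).flatten == ans then true
     else false)
    = (if ans.length ≠ P.flatten.length then false
       else if ans == P.flatten.reverse then true
       else if segmented ans 0 (P.map List.reverse) then true
       else if segmented ans 0 P.reverse then true
       else singleWin ans P.flatten.length (lcpLen ans P.flatten)
              (lcpLen ans.reverse P.flatten.reverse) 0 P) := by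
  have hl2 : ((P.map List.reverse).flatten).length = P.flatten.length := by
    simp [List.length_flatten, List.map_map, Function.comp_def]
  have hl4 : (P.reverse.flatten).length = P.flatten.length := by
    simp [List.length_flatten, List.map_reverse]
  by_cases hlen : ans.length = P.flatten.length
  · rw [if_neg (show ¬(ans.length ≠ P.flatten.length) by simp [hlen])]
    have e5 : (P.reverse.map List.reverse).flatten = P.flatten.reverse :=
      flatten_reverse_map_reverse P
    have e1 : (ans == P.flatten.reverse) = (P.flatten.reverse == ans) := by
      rw [Bool.eq_iff_iff]; simp only [beq_iff_eq]; exact eq_comm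
    have e2 : segmented ans 0 (P.map List.reverse) = ((P.map List.reverse).flatten == ans) := by
      rw [segmented_eq_flatten _ ans 0 (by omega)]
      simp
    have e3 : segmented ans 0 P.reverse = (P.reverse.flatten == ans) := by
      rw [segmented_eq_flatten _ ans 0 (by omega)]
      simp
    have e4 : singleWin ans P.flatten.length (lcpLen ans P.flatten)
          (lcpLen ans.reverse P.flatten.reverse) 0 P
        = (List.range P.length).any
            (fun i => (P.set i (P[i]!.reverse)).flatten == ans) := by
      have h1 := singleWin_eq_singleScan P.flatten ans hlen P ([] : List Char) (by simp)
      have h2 := singleScan_eq_any P [] ans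
      simp only [List.length_nil, List.nil_append] at h1 h2
      rw [h1, h2]
    rw [e1, e2, e3, e4, e5]
    exact bool_rearrange _ _ _ _
  · rw [if_pos hlen]
    have hne : ∀ (x : List Char), x.length = P.flatten.length → (x == ans) = false := by
      intro x hx
      rw [beq_eq_false_iff_ne]
      intro he
      exact hlen (by rw [← he, hx])
    have h1 : (List.range P.length).any
        (fun i => (P.set i (P[i]!.reverse)).flatten == ans) = false := by
      rw [List.any_eq_false]
      intro i hi
      rw [List.mem_range] at hi
      rw [Bool.not_eq_true, beq_eq_false_iff_ne]
      intro he
      exact hlen (by rw [← he]; exact length_flatten_set P i hi)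
    have h2 := hne _ hl2
    have h3 := hne (P.flatten.reverse) (by simp)
    have h4 := hne _ hl4
    have h5 := hne ((P.reverse.map List.reverse).flatten)
      (by rw [flatten_reverse_map_reverse]; simp)
    rw [h1, h2, h3, h4, h5]
    rfl

-- ===== VERDICT (by name: the statement is the Claim_ definition above) =====
theorem try_reversal_combos_py_spec : Claim_equal_try_reversal_combos_py := by
  intro contribs answer _ _
  unfold Spec_try_reversal_combos_py try_reversal_combos_py try_reversal_combos_py_alt
  exact core (contribs.map (fun c => (PySem.List.pyGetD c 0 "").toList)) answer.toList
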